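-- pv_equiv track=rewrite | github.com/Siru645/DataAnalysisMatching.py | Strategyproof_DA.py | count_students_willing_to_swap
-- ===== SOURCE A (Python) =====
-- def prefers_school_over_another(preference_list, school1, school2):
--     """Check if a student prefers school1 over school2."""
--     try:
--         rank1 = preference_list.index(school1)
--         rank2 = preference_list.index(school2)
--         return rank1 < rank2
--     except ValueError:
--         return False
--
-- def check_two_way_swap(students, matching, parsed_pref_lists):
--     """Check if any two students would prefer to swap schools in ALL their preference lists."""
--     for i in range(len(students)):
--         for j in range(i + 1, len(students)):
--             student1 = students[i]
--             student2 = students[j]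
--
--             both_prefer_swap = (
--                     all(prefers_school_over_another(pref_list, matching[student2], matching[student1])
--                         for pref_list in parsed_pref_lists[student1]) and
--                     all(prefers_school_over_another(pref_list, matching[student1], matching[student2])
--                         for pref_list in parsed_pref_lists[student2])
--             )
--
--             if both_prefer_swap:
--                 return True
--
--     return False
--
-- def check_three_way_swap(students, matching, parsed_pref_lists):
--     """Check if all three students would prefer a 3-way swap in ALL their preference lists."""
--     forward_cycle = (
--             all(prefers_school_over_another(pref_list, matching[students[1]], matching[students[0]])
--                 for pref_list in parsed_pref_lists[students[0]]) and
--             all(prefers_school_over_another(pref_list, matching[students[2]], matching[students[1]])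
--                 for pref_list in parsed_pref_lists[students[1]]) and
--             all(prefers_school_over_another(pref_list, matching[students[0]], matching[students[2]])
--                 for pref_list in parsed_pref_lists[students[2]])
--     )
--
--     backward_cycle = (
--             all(prefers_school_over_another(pref_list, matching[students[2]], matching[students[0]])
--                 for pref_list in parsed_pref_lists[students[0]]) and
--             all(prefers_school_over_another(pref_list, matching[students[0]], matching[students[1]])
--                 for pref_list in parsed_pref_lists[students[1]]) and
--             all(prefers_school_over_another(pref_list, matching[students[1]], matching[students[2]])
--                 for pref_list in parsed_pref_lists[students[2]])
--     )
--
--     return forward_cycle or backward_cycle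
--
-- def count_students_willing_to_swap(matching, student_pref_lists):
--     """Count how many students would like to swap their allocations."""
--     students = list(matching.keys())
--     if len(students) != 3:
--         return 0
--
--     parsed_pref_lists = {}
--     for student_role, pref_lists in student_pref_lists.items():
--         parsed_pref_lists[student_role] = []
--         for pref_str in pref_lists:
--             parsed_list = [school.strip() for school in pref_str.split(',')]
--             parsed_pref_lists[student_role].append(parsed_list)
--
--     if check_three_way_swap(students, matching, parsed_pref_lists):
--         return 3
--
--     if check_two_way_swap(students, matching, parsed_pref_lists):
--         return 2
--
--     return 0
-- ===== SOURCE B (Python) =====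
-- def count_students_willing_to_swap(matching, student_pref_lists):
--     """Count how many students would like to swap their allocations."""
--     students = list(matching.keys())
--     if len(students) != 3:
--         return 0
--
--     parsed = {s: [[school.strip() for school in pref_str.split(',')] for pref_str in pls]
--               for s, pls in student_pref_lists.items()}
--
--     def unanimous(s, t):
--         # student s prefers t's school over their own in every one of their lists
--         own, other = matching[s], matching[t]
--         for pl in parsed[s]:
--             try:
--                 if not (pl.index(other) < pl.index(own)):
--                     return False
--             except ValueError:
--                 return False
--         return True
--
--     # the five non-identity permutations of (0, 1, 2): two 3-cycles, three transpositions
--     perms = [(1, 2, 0), (2, 0, 1), (0, 2, 1), (1, 0, 2), (2, 1, 0)]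
--     best = 0
--     for p in perms:
--         if all(unanimous(students[s], students[p[s]]) for s in range(3) if p[s] != s):
--             best = max(best, sum(1 for s in range(3) if p[s] != s))
--     return best
-- ===== Notes on version B (the rewrite author's own statement) =====
-- stated objective: alternative
-- what changed: Replaces the three hardcoded swap-checking helpers (forward/backward cycle and pairwise loops) by one uniform pass over the five non-identity permutations of the three students, testing for each whether every moved student unanimously prefers the school of the student they would take over, and returning the size of the largest passing permutation's moved set. …
-- outside the precondition, e.g. on count_students_willing_to_swap({'a': 'X', 'b': 'Y', 'c': 'Z'}, {'a': ['Y,X'], 'b': ['X,Y']}): A returns 2, B returns 2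
import Mathlib
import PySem

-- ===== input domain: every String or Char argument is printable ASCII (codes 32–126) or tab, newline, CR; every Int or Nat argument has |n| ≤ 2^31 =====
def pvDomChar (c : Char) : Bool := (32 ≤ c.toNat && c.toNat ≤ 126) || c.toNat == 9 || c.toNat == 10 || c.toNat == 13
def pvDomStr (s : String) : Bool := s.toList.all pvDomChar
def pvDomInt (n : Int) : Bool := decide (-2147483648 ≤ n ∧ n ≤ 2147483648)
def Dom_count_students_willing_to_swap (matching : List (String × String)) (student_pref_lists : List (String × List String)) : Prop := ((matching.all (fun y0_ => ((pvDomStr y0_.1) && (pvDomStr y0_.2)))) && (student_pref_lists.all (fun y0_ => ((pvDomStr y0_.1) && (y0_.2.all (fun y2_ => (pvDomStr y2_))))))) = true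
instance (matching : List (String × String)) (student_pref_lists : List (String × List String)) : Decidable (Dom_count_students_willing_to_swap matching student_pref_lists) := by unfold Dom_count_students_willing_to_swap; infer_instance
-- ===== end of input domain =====

-- B replaces A's three hardcoded swap helpers by one uniform pass over the five non-identity
-- permutations of the three students (objective: alternative decomposition, same cost).

-- ===== PORT A =====
-- [school.strip() for school in pref_str.split(',')]  (shared by both ports: both Pythons contain this exact expression)
def pvParse (pref_str : String) : List String :=
  -- split? is total here: the separator "," is nonempty
  ((PySem.Str.split? pref_str ",").getD []).map (fun school => PySem.Str.strip school)

-- prefers_school_over_another: ValueError from either .index is caught and yields False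
def pvPrefers (preference_list : List String) (school1 school2 : String) : Bool :=
  match PySem.List.index? preference_list school1 with
  | none => false
  | some rank1 =>
    match PySem.List.index? preference_list school2 with
    | none => false
    | some rank2 => decide (rank1 < rank2)

-- matching[s] / parsed_pref_lists[s]: total forms; Pre_ guarantees the key is present wherever A reads it
def pvMGet (matching : PySem.Dict String String) (s : String) : String :=
  (matching.get? s).getD ""
def pvPGet (parsed : PySem.Dict String (List (List String))) (s : String) : List (List String) :=
  (parsed.get? s).getD []

def pvCheckTwoWay (students : List String) (matching : PySem.Dict String String)
    (parsed : PySem.Dict String (List (List String))) : Bool :=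
  (PySem.List.pyRange 0 (students.length : Int) 1).any fun i =>
    (PySem.List.pyRange (i + 1) (students.length : Int) 1).any fun j =>
      let student1 := PySem.List.pyGetD students i ""
      let student2 := PySem.List.pyGetD students j ""
      ((pvPGet parsed student1).all
          (fun pl => pvPrefers pl (pvMGet matching student2) (pvMGet matching student1)) &&
       (pvPGet parsed student2).all
          (fun pl => pvPrefers pl (pvMGet matching student1) (pvMGet matching student2)))

def pvCheckThreeWay (students : List String) (matching : PySem.Dict String String)
    (parsed : PySem.Dict String (List (List String))) : Bool :=
  let s0 := PySem.List.pyGetD students 0 ""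
  let s1 := PySem.List.pyGetD students 1 ""
  let s2 := PySem.List.pyGetD students 2 ""
  (((pvPGet parsed s0).all (fun pl => pvPrefers pl (pvMGet matching s1) (pvMGet matching s0)) &&
    (pvPGet parsed s1).all (fun pl => pvPrefers pl (pvMGet matching s2) (pvMGet matching s1)) &&
    (pvPGet parsed s2).all (fun pl => pvPrefers pl (pvMGet matching s0) (pvMGet matching s2))) ||
   ((pvPGet parsed s0).all (fun pl => pvPrefers pl (pvMGet matching s2) (pvMGet matching s0)) &&
    (pvPGet parsed s1).all (fun pl => pvPrefers pl (pvMGet matching s0) (pvMGet matching s1)) &&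
    (pvPGet parsed s2).all (fun pl => pvPrefers pl (pvMGet matching s1) (pvMGet matching s2))))

def count_students_willing_to_swap (matching : List (String × String)) (student_pref_lists : List (String × List String)) : Int :=
  let m := PySem.Dict.ofList matching
  let students := m.keys
  if students.length ≠ 3 then 0
  else
    let parsed := (PySem.Dict.ofList student_pref_lists).items.foldl
        (fun acc p => acc.insert p.1 (p.2.foldl (fun ls pref_str => ls ++ [pvParse pref_str]) []))
        PySem.Dict.empty
    if pvCheckThreeWay students m parsed then 3
    else if pvCheckTwoWay students m parsed then 2
    else 0

-- ===== PORT B =====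
def pvAltUnanimous (m : PySem.Dict String String) (parsed : PySem.Dict String (List (List String)))
    (s t : String) : Bool :=
  let own := (m.get? s).getD ""
  let other := (m.get? t).getD ""
  ((parsed.get? s).getD []).all fun pl =>
    match PySem.List.index? pl other, PySem.List.index? pl own with
    | some r1, some r2 => decide (r1 < r2)
    | _, _ => false

def count_students_willing_to_swap_alt (matching : List (String × String)) (student_pref_lists : List (String × List String)) : Int :=
  let m := PySem.Dict.ofList matching
  let students := m.keys
  if students.length ≠ 3 then 0
  else
    let parsed := (PySem.Dict.ofList student_pref_lists).items.foldl
        (fun acc p => acc.insert p.1 (p.2.map pvParse)) PySem.Dict.empty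
    let perms : List (List Int) := [[1, 2, 0], [2, 0, 1], [0, 2, 1], [1, 0, 2], [2, 1, 0]]
    perms.foldl
      (fun best p =>
        let ok := (PySem.List.pyRange 0 3 1).all fun s =>
          let ps := PySem.List.pyGetD p s 0
          if ps ≠ s then
            pvAltUnanimous m parsed (PySem.List.pyGetD students s "") (PySem.List.pyGetD students ps "")
          else true
        if ok then
          max best ((((PySem.List.pyRange 0 3 1).countP (fun s => PySem.List.pyGetD p s 0 ≠ s)) : Int))
        else best)
      0

-- ===== PRECONDITION & SPEC =====
-- Pre_ excludes inputs where exactly three students are matched but some matched student is missing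
-- from student_pref_lists: on those A usually raises KeyError, and where short-circuit evaluation lets
-- A still return, that value is an accident of evaluation order (B may raise KeyError there instead).
def Pre_count_students_willing_to_swap (matching : List (String × String)) (student_pref_lists : List (String × List String)) : Prop :=
  (PySem.Dict.ofList matching).keys.length = 3 →
    ∀ s ∈ (PySem.Dict.ofList matching).keys,
      (PySem.Dict.ofList student_pref_lists).contains s = true
instance (matching : List (String × String)) (student_pref_lists : List (String × List String)) : Decidable (Pre_count_students_willing_to_swap matching student_pref_lists) := by unfold Pre_count_students_willing_to_swap; infer_instance

def pvWitness_count_students_willing_to_swap : (List (String × String)) × (List (String × List String)) :=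
  ([("a", "X"), ("b", "Y"), ("c", "Z")],
   [("a", ["Y, X"]), ("b", ["X,Y"]), ("c", ["Z"])])

def Spec_count_students_willing_to_swap (matching : List (String × String)) (student_pref_lists : List (String × List String)) (out : Int) : Prop := out = count_students_willing_to_swap_alt matching student_pref_lists
instance (matching : List (String × String)) (student_pref_lists : List (String × List String)) (out : Int) : Decidable (Spec_count_students_willing_to_swap matching student_pref_lists out) := by unfold Spec_count_students_willing_to_swap; infer_instance

-- ===== CLAIM (what is proved, stated in full; the proofs are below) =====
def Claim_equal_count_students_willing_to_swap : Prop := ∀ (matching : List (String × String)) (student_pref_lists : List (String × List String)), Dom_count_students_willing_to_swap matching student_pref_lists → Pre_count_students_willing_to_swap matching student_pref_lists → Spec_count_students_willing_to_swap matching student_pref_lists (count_students_willing_to_swap matching student_pref_lists)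

-- ===== LEMMAS AND PROOFS =====

-- B's per-list test is A's prefers_school_over_another, written as a simultaneous match
theorem pvAltUnanimous_eq (m : PySem.Dict String String)
    (parsed : PySem.Dict String (List (List String))) (s t : String) :
    pvAltUnanimous m parsed s t =
      (pvPGet parsed s).all (fun pl => pvPrefers pl (pvMGet m t) (pvMGet m s)) := by
  unfold pvAltUnanimous pvPGet pvMGet
  dsimp only
  congr 1
  funext pl
  unfold pvPrefers
  cases h1 : PySem.List.index? pl ((m.get? t).getD "") <;>
    cases h2 : PySem.List.index? pl ((m.get? s).getD "") <;> simp

-- the core: on a three-student list both decision procedures are the same function of the six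
-- "x unanimously prefers y's school" booleans
theorem pvKey (m : PySem.Dict String String)
    (parsed : PySem.Dict String (List (List String))) (a b c : String) :
    (if pvCheckThreeWay [a, b, c] m parsed = true then (3 : Int)
     else if pvCheckTwoWay [a, b, c] m parsed = true then 2 else 0)
    = ([[1, 2, 0], [2, 0, 1], [0, 2, 1], [1, 0, 2], [2, 1, 0]] : List (List Int)).foldl
        (fun best p =>
          let ok := (PySem.List.pyRange 0 3 1).all fun s =>
            let ps := PySem.List.pyGetD p s 0
            if ps ≠ s then
              pvAltUnanimous m parsed (PySem.List.pyGetD [a, b, c] s "")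
                (PySem.List.pyGetD [a, b, c] ps "")
            else true
          if ok then
            max best ((((PySem.List.pyRange 0 3 1).countP
                (fun s => PySem.List.pyGetD p s 0 ≠ s)) : Int))
          else best)
        0 := by
  have hlen : ([a, b, c] : List String).length = 3 := rfl
  have hr : PySem.List.pyRange 0 3 1 = [0, 1, 2] := by decide
  have hr1 : PySem.List.pyRange ((0 : Int) + 1) 3 1 = [1, 2] := by decide
  have hr2 : PySem.List.pyRange ((1 : Int) + 1) 3 1 = [2] := by decide
  have hr3 : PySem.List.pyRange ((2 : Int) + 1) 3 1 = [] := by decide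
  have ga : PySem.List.pyGetD [a, b, c] (0 : Int) "" = a := rfl
  have gb : PySem.List.pyGetD [a, b, c] (1 : Int) "" = b := rfl
  have gc : PySem.List.pyGetD [a, b, c] (2 : Int) "" = c := rfl
  have gp120_0 : PySem.List.pyGetD ([1, 2, 0] : List Int) (0 : Int) 0 = 1 := by decide
  have gp120_1 : PySem.List.pyGetD ([1, 2, 0] : List Int) (1 : Int) 0 = 2 := by decide
  have gp120_2 : PySem.List.pyGetD ([1, 2, 0] : List Int) (2 : Int) 0 = 0 := by decide
  have gp201_0 : PySem.List.pyGetD ([2, 0, 1] : List Int) (0 : Int) 0 = 2 := by decide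
  have gp201_1 : PySem.List.pyGetD ([2, 0, 1] : List Int) (1 : Int) 0 = 0 := by decide
  have gp201_2 : PySem.List.pyGetD ([2, 0, 1] : List Int) (2 : Int) 0 = 1 := by decide
  have gp021_0 : PySem.List.pyGetD ([0, 2, 1] : List Int) (0 : Int) 0 = 0 := by decide
  have gp021_1 : PySem.List.pyGetD ([0, 2, 1] : List Int) (1 : Int) 0 = 2 := by decide
  have gp021_2 : PySem.List.pyGetD ([0, 2, 1] : List Int) (2 : Int) 0 = 1 := by decide
  have gp102_0 : PySem.List.pyGetD ([1, 0, 2] : List Int) (0 : Int) 0 = 1 := by decide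
  have gp102_1 : PySem.List.pyGetD ([1, 0, 2] : List Int) (1 : Int) 0 = 0 := by decide
  have gp102_2 : PySem.List.pyGetD ([1, 0, 2] : List Int) (2 : Int) 0 = 2 := by decide
  have gp210_0 : PySem.List.pyGetD ([2, 1, 0] : List Int) (0 : Int) 0 = 2 := by decide
  have gp210_1 : PySem.List.pyGetD ([2, 1, 0] : List Int) (1 : Int) 0 = 1 := by decide
  have gp210_2 : PySem.List.pyGetD ([2, 1, 0] : List Int) (2 : Int) 0 = 0 := by decide
  have hif00 : ∀ x : Bool, (if ((0 : Int) ≠ 0) then x else true) = true := fun x => if_neg (by decide)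
  have hif01 : ∀ x : Bool, (if ((0 : Int) ≠ 1) then x else true) = x := fun x => if_pos (by decide)
  have hif02 : ∀ x : Bool, (if ((0 : Int) ≠ 2) then x else true) = x := fun x => if_pos (by decide)
  have hif10 : ∀ x : Bool, (if ((1 : Int) ≠ 0) then x else true) = x := fun x => if_pos (by decide)
  have hif11 : ∀ x : Bool, (if ((1 : Int) ≠ 1) then x else true) = true := fun x => if_neg (by decide)
  have hif12 : ∀ x : Bool, (if ((1 : Int) ≠ 2) then x else true) = x := fun x => if_pos (by decide)
  have hif20 : ∀ x : Bool, (if ((2 : Int) ≠ 0) then x else true) = x := fun x => if_pos (by decide)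
  have hif21 : ∀ x : Bool, (if ((2 : Int) ≠ 1) then x else true) = x := fun x => if_pos (by decide)
  have hif22 : ∀ x : Bool, (if ((2 : Int) ≠ 2) then x else true) = true := fun x => if_neg (by decide)
  simp only [pvCheckThreeWay, pvCheckTwoWay, pvAltUnanimous_eq, hlen, Nat.cast_ofNat,
    hif00, hif01, hif02, hif10, hif11, hif12, hif20, hif21, hif22,
    hr, hr1, hr2, hr3, ga, gb, gc,
    gp120_0,gp120_1,gp120_2,gp201_0,gp201_1,gp201_2,gp021_0,gp021_1,gp021_2,gp102_0,gp102_1,gp102_2,gp210_0,gp210_1,gp210_2,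
    List.all_cons, List.all_nil, List.any_cons, List.any_nil, List.foldl_cons, List.foldl_nil]
  generalize ((pvPGet parsed a).all fun pl => pvPrefers pl (pvMGet m b) (pvMGet m a)) = uab
  generalize ((pvPGet parsed b).all fun pl => pvPrefers pl (pvMGet m a) (pvMGet m b)) = uba
  generalize ((pvPGet parsed a).all fun pl => pvPrefers pl (pvMGet m c) (pvMGet m a)) = uac
  generalize ((pvPGet parsed c).all fun pl => pvPrefers pl (pvMGet m a) (pvMGet m c)) = uca
  generalize ((pvPGet parsed b).all fun pl => pvPrefers pl (pvMGet m c) (pvMGet m b)) = ubc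
  generalize ((pvPGet parsed c).all fun pl => pvPrefers pl (pvMGet m b) (pvMGet m c)) = ucb
  revert uab uba uac uca ubc ucb
  decide

-- ===== VERDICT (by name: the statement is the Claim_ definition above) =====
theorem count_students_willing_to_swap_spec : Claim_equal_count_students_willing_to_swap := by
  intro matching spl _ _
  unfold Spec_count_students_willing_to_swap
  unfold count_students_willing_to_swap count_students_willing_to_swap_alt
  simp only [PySem.List.foldl_append_singleton_eq_map, List.nil_append]
  by_cases h : (PySem.Dict.ofList matching).keys.length = 3
  · have hg : ¬ ((PySem.Dict.ofList matching).keys.length ≠ 3) := by simp [h]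
    simp only [if_neg hg]
    obtain ⟨a, b, c, habc⟩ := List.length_eq_three.mp h
    rw [habc]
    exact pvKey _ _ a b c
  · simp [h]
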